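-- pv_equiv track=rewrite | github.com/shk33/advent-of-code-2025 | day2/part1/solution.py | generate_invalid_ids
-- ===== SOURCE A (Python) =====
-- def generate_invalid_ids(max_id):
--     """Generates all possible invalid IDs up to the max_id."""
--     invalid_ids = []
--     base = 1
--     while True:
--         s_base = str(base)
--         s_invalid = s_base + s_base
--         n_invalid = int(s_invalid)
--
--         if n_invalid > max_id:
--             # If the number of digits has increased and we are already over max,
--             # any further number with this many digits will also be over.
--             # This is a simple but effective cutoff. A tighter bound could be used.
--             if len(str(base)) > len(str(base - 1)):
--                  break
--         else:
--             invalid_ids.append(n_invalid)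
--
--         base += 1
--     return invalid_ids
-- ===== SOURCE B (Python) =====
-- def generate_invalid_ids(max_id):
--     """Generates all possible invalid IDs up to the max_id.
--
--     Works per digit-length: a self-concatenation of a d-digit base b is
--     b * (10**d + 1), so for each d the valid bases are the d-digit numbers
--     b with b <= max_id // (10**d + 1).
--     """
--     invalid_ids = []
--     d = 1
--     while True:
--         m = 10 ** d + 1
--         lo = 10 ** (d - 1)
--         hi = 10 ** d - 1
--         top = min(hi, max_id // m)
--         if top < lo:
--             return invalid_ids
--         invalid_ids.extend(b * m for b in range(lo, top + 1))
--         if top < hi: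
--             return invalid_ids
--         d += 1
-- ===== Notes on version B (the rewrite author's own statement) =====
-- stated objective: faster
-- what changed: Instead of scanning every base, converting it to a string, self-concatenating and re-parsing it, B works per digit-length d: a d-digit base b yields b*(10**d+1), so it emits one arithmetic range lo..min(hi, max_id // (10**d+1)) per d and stops as soon as a block is cut short.
import Mathlib
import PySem

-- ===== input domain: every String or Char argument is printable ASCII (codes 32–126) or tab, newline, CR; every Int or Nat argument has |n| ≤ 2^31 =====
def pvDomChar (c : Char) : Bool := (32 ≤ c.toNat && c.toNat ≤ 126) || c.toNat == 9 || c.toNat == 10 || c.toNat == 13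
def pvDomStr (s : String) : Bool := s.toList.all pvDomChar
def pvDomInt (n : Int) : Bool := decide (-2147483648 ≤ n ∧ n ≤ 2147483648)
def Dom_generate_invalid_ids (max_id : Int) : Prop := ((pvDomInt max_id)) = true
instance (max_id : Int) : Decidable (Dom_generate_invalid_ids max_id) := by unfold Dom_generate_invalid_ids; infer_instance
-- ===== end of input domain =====

-- B replaces A's base-by-base scan (string self-concatenation and re-parsing of every base)
-- by one arithmetic range of bases per digit length (no per-base string round-trips).

-- ===== PORT A =====
-- int(s) ported by hand as the decimal digit fold; exact on the nonempty all-digit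
-- strings it is applied to here (str(base)+str(base) with base >= 1).
def pyDigitsVal (cs : List Char) : Int :=
  cs.foldl (fun a c => 10 * a + ((c.toNat : Int) - 48)) 0

-- the while-True loop of A; fuel only makes the recursion total: it is an ample
-- iteration bound (the loop breaks at the first power-of-ten base b with
-- b*(10b+1) > max_id, i.e. within 10^6 iterations for every |max_id| <= 2^31).
def genLoopA (max_id : Int) (invalid_ids : List Int) (base : Int) : Nat → List Int
  | 0 => invalid_ids
  | fuel + 1 =>
    let s_base := PySem.Int.toChars base          -- str(base)
    let s_invalid := s_base ++ s_base             -- s_base + s_base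
    let n_invalid := pyDigitsVal s_invalid        -- int(s_invalid)
    if n_invalid > max_id then
      if (PySem.Int.toChars base).length > (PySem.Int.toChars (base - 1)).length then
        invalid_ids                               -- break
      else genLoopA max_id invalid_ids (base + 1) fuel
    else genLoopA max_id (invalid_ids ++ [n_invalid]) (base + 1) fuel

def generate_invalid_ids (max_id : Int) : List Int :=
  genLoopA max_id [] 1 1000000

-- ===== PORT B =====
-- the while-True loop of B over the digit length d; fuel only makes the recursion
-- total: it is an ample bound on the number of digit-length blocks (the loop
-- returns once max_id // (10^d+1) falls short of 10^d - 1).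
def genLoopB (max_id : Int) (invalid_ids : List Int) (d : Nat) : Nat → List Int
  | 0 => invalid_ids
  | fuel + 1 =>
    let m : Int := 10 ^ d + 1
    let lo : Int := 10 ^ (d - 1)
    let hi : Int := 10 ^ d - 1
    let top : Int := min hi (PySem.Int.floordiv max_id m)   -- min(hi, max_id // m)
    if top < lo then invalid_ids
    else
      let out := invalid_ids ++ (PySem.List.pyRange lo (top + 1) 1).map (fun b => b * m)
      if top < hi then out
      else genLoopB max_id out (d + 1) fuel

def generate_invalid_ids_alt (max_id : Int) : List Int :=
  genLoopB max_id [] 1 33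

-- ===== PRECONDITION & SPEC =====
def Spec_generate_invalid_ids (max_id : Int) (out : List Int) : Prop := out = generate_invalid_ids_alt max_id
instance (max_id : Int) (out : List Int) : Decidable (Spec_generate_invalid_ids max_id out) := by unfold Spec_generate_invalid_ids; infer_instance

-- ===== CLAIM (what is proved, stated in full; the proofs are below) =====
def Claim_equal_generate_invalid_ids : Prop := ∀ (max_id : Int), Dom_generate_invalid_ids max_id → Spec_generate_invalid_ids max_id (generate_invalid_ids max_id)

-- ===== LEMMAS AND PROOFS =====


theorem toDigitsCore_spec (n : Nat) :
    ∀ (f : Nat) (l : List Char), n < f →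
      Nat.toDigitsCore 10 f n l = Nat.toDigits 10 n ++ l := by
  induction n using Nat.strong_induction_on with
  | _ n ih =>
    intro f l hf
    match f, hf with
    | f + 1, _ =>
      rw [Nat.toDigits]
      by_cases h0 : n / 10 = 0
      · simp [Nat.toDigitsCore, h0]
      · have hn10 : 10 ≤ n := by
          by_contra hc; exact h0 (Nat.div_eq_of_lt (by omega))
        have hlt : n / 10 < n := Nat.div_lt_self (by omega) (by omega)
        simp only [Nat.toDigitsCore, h0, if_false]
        rw [ih (n/10) hlt f _ (by omega), ih (n/10) hlt n _ (by omega)]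
        simp

theorem toDigits_small (n : Nat) (h : n < 10) :
    Nat.toDigits 10 n = [Nat.digitChar n] := by
  have h0 : n / 10 = 0 := Nat.div_eq_of_lt h
  rw [Nat.toDigits]
  simp [Nat.toDigitsCore, h0, Nat.mod_eq_of_lt h]

theorem toDigits_step (n : Nat) (h : 10 ≤ n) :
    Nat.toDigits 10 n = Nat.toDigits 10 (n / 10) ++ [Nat.digitChar (n % 10)] := by
  have h0 : n / 10 ≠ 0 := by
    intro hc; have := Nat.div_eq_of_lt (show n < 10 by omega); omega
  rw [Nat.toDigits]
  simp only [Nat.toDigitsCore, h0, if_false]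
  have hlt : n / 10 < n := Nat.div_lt_self (by omega) (by omega)
  exact toDigitsCore_spec (n/10) n _ hlt

-- decimal value of a digit list folded onto an accumulator (generalises pyDigitsVal)
def dvalF (a : Int) (cs : List Char) : Int :=
  cs.foldl (fun x c => 10 * x + ((c.toNat : Int) - 48)) a

theorem pyDigitsVal_eq (cs : List Char) : pyDigitsVal cs = dvalF 0 cs := rfl

theorem dvalF_append (a : Int) (xs ys : List Char) :
    dvalF a (xs ++ ys) = dvalF (dvalF a xs) ys := by
  simp [dvalF, List.foldl_append]

theorem digitChar_val (r : Nat) (h : r < 10) :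
    ((Nat.digitChar r).toNat : Int) - 48 = r := by
  interval_cases r <;> decide

theorem toDigits_length (n : Nat) :
    (Nat.toDigits 10 n).length = Nat.log 10 n + 1 := by
  induction n using Nat.strong_induction_on with
  | _ n ih =>
    by_cases h : n < 10
    · rw [toDigits_small n h, Nat.log_of_lt h]; rfl
    · push_neg at h
      have hlt : n / 10 < n := Nat.div_lt_self (by omega) (by omega)
      rw [toDigits_step n h]
      have hlog : Nat.log 10 n = Nat.log 10 (n / 10) + 1 := by
        have := Nat.log_div_base 10 n
        have hpos : 0 < Nat.log 10 n := Nat.log_pos (by omega) h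
        omega
      rw [List.length_append, ih _ hlt, hlog]
      simp

theorem toDigits_val (n : Nat) :
    ∀ a : Int, dvalF a (Nat.toDigits 10 n) = a * 10 ^ (Nat.log 10 n + 1) + n := by
  induction n using Nat.strong_induction_on with
  | _ n ih =>
    intro a
    by_cases h : n < 10
    · rw [toDigits_small n h, Nat.log_of_lt h]
      simp [dvalF, digitChar_val n h]; ring
    · push_neg at h
      have hlt : n / 10 < n := Nat.div_lt_self (by omega) (by omega)
      have hlog : Nat.log 10 n = Nat.log 10 (n / 10) + 1 := by
        have := Nat.log_div_base 10 n
        have hpos : 0 < Nat.log 10 n := Nat.log_pos (by omega) h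
        omega
      rw [toDigits_step n h, dvalF_append, ih _ hlt a, hlog]
      have hone : ∀ (b : Int) (c : Char), dvalF b [c] = 10 * b + ((c.toNat : Int) - 48) := by
        intro b c; rfl
      rw [hone, digitChar_val (n % 10) (Nat.mod_lt _ (by omega))]
      have hdm : (10 : Int) * ↑(n / 10) + ↑(n % 10) = n := by
        omega
      push_cast
      ring_nf
      ring_nf at hdm
      omega

theorem toChars_nonneg (b : Int) (h : 0 ≤ b) :
    PySem.Int.toChars b = Nat.toDigits 10 b.toNat := by
  rw [PySem.Int.toChars, if_neg (by omega)]

theorem log_block (d : Nat) (x : Int) (hd : 1 ≤ d)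
    (hlo : (10:Int) ^ (d-1) ≤ x) (hhi : x < (10:Int) ^ d) :
    Nat.log 10 x.toNat = d - 1 := by
  have h1 : ((10:Nat) ^ (d-1) : Int) ≤ x := by push_cast; exact hlo
  have h2 : x < ((10:Nat) ^ d : Int) := by push_cast; exact hhi
  have hx0 : 0 ≤ x := le_trans (by positivity) hlo
  apply Nat.log_eq_of_pow_le_of_lt_pow
  · omega
  · have : d - 1 + 1 = d := by omega
    rw [this]; omega

theorem len_block (d : Nat) (x : Int) (hd : 1 ≤ d)
    (hlo : (10:Int) ^ (d-1) ≤ x) (hhi : x < (10:Int) ^ d) :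
    (PySem.Int.toChars x).length = d := by
  have hx0 : 0 ≤ x := le_trans (by positivity) hlo
  rw [toChars_nonneg x hx0, toDigits_length, log_block d x hd hlo hhi]
  omega

theorem val_block (d : Nat) (x : Int) (hd : 1 ≤ d)
    (hlo : (10:Int) ^ (d-1) ≤ x) (hhi : x < (10:Int) ^ d) :
    dvalF 0 (PySem.Int.toChars x ++ PySem.Int.toChars x) = x * (10 ^ d + 1) := by
  have hx0 : 0 ≤ x := le_trans (by positivity) hlo
  have hcast : ((x.toNat : Int)) = x := Int.toNat_of_nonneg hx0
  have hl : Nat.log 10 x.toNat + 1 = d := by rw [log_block d x hd hlo hhi]; omega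
  rw [toChars_nonneg x hx0, dvalF_append, toDigits_val, toDigits_val, hl, hcast]
  ring

theorem filter_le_pyRange (T : Int) :
    ∀ (j : Nat) (a c : Int), c ≤ a + j →
      (PySem.List.pyRange a c 1).filter (fun x => decide (x ≤ T)) =
        PySem.List.pyRange a (min c (T + 1)) 1 := by
  intro j
  induction j with
  | zero =>
    intro a c h
    rw [PySem.List.pyRange_one_eq_nil (by omega), PySem.List.pyRange_one_eq_nil (by omega)]
    rfl
  | succ j ih =>
    intro a c h
    by_cases hac : c ≤ a
    · rw [PySem.List.pyRange_one_eq_nil hac, PySem.List.pyRange_one_eq_nil (by omega)]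
      rfl
    · push_neg at hac
      rw [PySem.List.pyRange_one_cons hac]
      by_cases haT : a ≤ T
      · rw [List.filter_cons_of_pos (by simpa using haT), ih (a+1) c (by omega)]
        rw [PySem.List.pyRange_one_cons (lt_min hac (by omega))]
      · rw [List.filter_cons_of_neg (by simpa using haT), ih (a+1) c (by omega)]
        rw [PySem.List.pyRange_one_eq_nil (by omega), PySem.List.pyRange_one_eq_nil (by omega)]

theorem scanA (max_id : Int) (d : Nat) (hd : 1 ≤ d) :
    ∀ (j : Nat) (b : Int) (acc : List Int) (fuel : Nat),
      (10:Int) ^ (d-1) ≤ b → b + j = (10:Int) ^ d → j ≤ fuel →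
      (b = (10:Int) ^ (d-1) → d = 1 ∨ (10:Int) ^ (d-1) * (10 ^ d + 1) ≤ max_id) →
      genLoopA max_id acc b fuel =
        genLoopA max_id
          (acc ++ ((PySem.List.pyRange b ((10:Int) ^ d) 1).filter
              (fun x => decide (x * (10 ^ d + 1) ≤ max_id))).map (fun x => x * (10 ^ d + 1)))
          ((10:Int) ^ d) (fuel - j) := by
  intro j
  induction j with
  | zero =>
    intro b acc fuel hlo hend hfuel hentry
    have hb : b = (10:Int) ^ d := by omega
    subst hb
    rw [PySem.List.pyRange_one_eq_nil (by omega)]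
    simp
  | succ j ih =>
    intro b acc fuel hlo hend hfuel hentry
    have hblt : b < (10:Int) ^ d := by omega
    obtain ⟨f, rfl⟩ : ∃ f, fuel = f + 1 := ⟨fuel - 1, by omega⟩
    have hval : dvalF 0 (PySem.Int.toChars b ++ PySem.Int.toChars b) = b * (10 ^ d + 1) :=
      val_block d b hd hlo hblt
    rw [genLoopA, pyDigitsVal_eq, hval]
    have hrange : PySem.List.pyRange b ((10:Int) ^ d) 1
        = b :: PySem.List.pyRange (b+1) ((10:Int) ^ d) 1 :=
      PySem.List.pyRange_one_cons hblt
    by_cases hgt : b * (10 ^ d + 1) > max_id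
    · rw [if_pos hgt]
      have hlen : ¬ (PySem.Int.toChars b).length > (PySem.Int.toChars (b - 1)).length := by
        by_cases hbl : (10:Int) ^ (d-1) < b
        · rw [len_block d b hd hlo hblt, len_block d (b-1) hd (by omega) (by omega)]
          omega
        · have hbe : b = (10:Int) ^ (d-1) := by omega
          have hd1 : d = 1 := by
            rcases hentry hbe with h1 | h2
            · exact h1
            · exfalso; rw [hbe] at hgt; omega
          subst hd1
          have hb1 : b = 1 := by simpa using hbe
          subst hb1
          decide
      rw [if_neg hlen]
      rw [ih (b+1) acc f (by omega) (by push_cast at hend; omega) (by omega)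
        (by intro hc; exfalso; omega)]
      rw [hrange, List.filter_cons_of_neg (by simpa using hgt)]
      have hfj : f + 1 - (j + 1) = f - j := by omega
      rw [hfj]
    · rw [if_neg hgt]
      push_neg at hgt
      rw [ih (b+1) (acc ++ [b * (10 ^ d + 1)]) f (by omega)
        (by push_cast at hend; omega) (by omega) (by intro hc; exfalso; omega)]
      rw [hrange, List.filter_cons_of_pos (by simpa using hgt)]
      simp

theorem mainBlocks (max_id : Int) :
    ∀ (k d : Nat) (acc : List Int) (fuelA fuelB : Nat),
      1 ≤ d →
      max_id < (10:Int) ^ (2*(d+k)) - 1 →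
      10 ^ (d+k) + 1 ≤ fuelA + 10 ^ (d-1) →
      k < fuelB →
      genLoopA max_id acc ((10:Int) ^ (d-1)) fuelA = genLoopB max_id acc d fuelB := by
  intro k
  induction k using Nat.strong_induction_on with
  | _ k ih =>
    intro d acc fuelA fuelB hd hmax hfA hfB
    obtain ⟨fB, rfl⟩ : ∃ fB, fuelB = fB + 1 := ⟨fuelB - 1, by omega⟩
    -- arithmetic facts about powers
    have hN1 : (10:Nat)^(d-1) ≤ 10^d := Nat.pow_le_pow_right (by norm_num) (by omega)
    have hN2 : (10:Nat)^d ≤ 10^(d+k) := Nat.pow_le_pow_right (by norm_num) (by omega)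
    have hN0 : 1 ≤ (10:Nat)^(d-1) := Nat.one_le_pow _ _ (by norm_num)
    have hi0 : (0:Int) < 10^(d-1) := by positivity
    have hi0' : (0:Int) < 10^d := by positivity
    have hm : (0:Int) < 10^d + 1 := by positivity
    have hp1 : (10:Int)^(d-1) * 10 = 10^d := by
      rw [← pow_succ]; congr 1; omega
    have hp2 : (10:Int)^d * 10 = 10^(d+1) := by rw [← pow_succ]
    have h2d : (10:Int)^d * 10^d = 10^(2*d) := by rw [← pow_add]; congr 1; omega
    have hcastd : (((10:Nat)^d : Nat) : Int) = (10:Int)^d := by push_cast; ring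
    have hcastd1 : (((10:Nat)^(d-1) : Nat) : Int) = (10:Int)^(d-1) := by push_cast; ring
    rw [genLoopB]
    set T := PySem.Int.floordiv max_id (10^d + 1) with hT
    by_cases hstop1 : min ((10:Int)^d - 1) T < 10^(d-1)
    · rw [if_pos hstop1]
      have hTlo : T < 10^(d-1) := by omega
      have hmaxlo : max_id < 10^(d-1) * (10^d + 1) :=
        (PySem.Int.floordiv_lt_iff_lt_mul hm).mp hTlo
      by_cases hd1 : d = 1
      · subst hd1
        have hmax11 : max_id < 11 := by norm_num at hmaxlo; omega
        have h10 : (10:Nat) ≤ fuelA := by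
          have h1k : (10:Nat)^1 ≤ 10^(1+k) := Nat.pow_le_pow_right (by norm_num) (by omega)
          simp at hfA h1k; omega
        have hsc := scanA max_id 1 le_rfl 9 1 acc fuelA (by norm_num) (by norm_num)
          (by omega) (fun _ => Or.inl rfl)
        norm_num at hsc
        rw [show ((10:Int)^(1-1)) = 1 by norm_num, hsc]
        have hTlo' : PySem.Int.floordiv max_id 11 < 1 :=
          (PySem.Int.floordiv_lt_iff_lt_mul (by norm_num)).mpr (by omega)
        have hfe : (PySem.List.pyRange 1 10 1).filter (fun x => decide (x * 11 ≤ max_id)) = [] := by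
          have hc : ∀ x ∈ PySem.List.pyRange 1 10 1,
              (decide (x * 11 ≤ max_id)) = (decide (x ≤ PySem.Int.floordiv max_id 11)) :=
            fun x _ => decide_eq_decide.mpr (PySem.Int.le_floordiv_iff_mul_le (by norm_num)).symm
          rw [List.filter_congr hc, filter_le_pyRange _ 9 1 10 (by norm_num),
            PySem.List.pyRange_one_eq_nil (by omega)]
        rw [hfe]
        obtain ⟨g, hg⟩ : ∃ g, fuelA - 9 = g + 1 := ⟨fuelA - 10, by omega⟩
        rw [hg, genLoopA]
        have hv10 : pyDigitsVal (PySem.Int.toChars 10 ++ PySem.Int.toChars 10) = 1010 := by decide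
        rw [hv10, if_pos (by omega), if_pos (by decide)]
        simp
      · -- d ≥ 2 : A breaks immediately at base 10^(d-1)
        have hd2 : 2 ≤ d := by omega
        obtain ⟨g, rfl⟩ : ∃ g, fuelA = g + 1 := ⟨fuelA - 1, by omega⟩
        rw [genLoopA, pyDigitsVal_eq]
        rw [val_block d ((10:Int)^(d-1)) hd le_rfl (by omega)]
        rw [if_pos (by omega)]
        have hlen1 : (PySem.Int.toChars ((10:Int)^(d-1))).length = d :=
          len_block d _ hd le_rfl (by omega)
        have hq1 : (10:Int)^(d-1-1) * 10 = 10^(d-1) := by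
          rw [← pow_succ]; congr 1; omega
        have hq0 : (0:Int) < 10^(d-1-1) := by positivity
        have hlen2 : (PySem.Int.toChars ((10:Int)^(d-1) - 1)).length = d - 1 :=
          len_block (d-1) _ (by omega) (by omega) (by omega)
        rw [if_pos (by omega)]
    · rw [if_neg hstop1]
      push_neg at hstop1
      have hloT : (10:Int)^(d-1) ≤ T := le_trans hstop1 (min_le_right _ _)
      have hml : 10^(d-1) * ((10:Int)^d + 1) ≤ max_id :=
        (PySem.Int.le_floordiv_iff_mul_le hm).mp hloT
      set jN : Nat := 10^d - 10^(d-1) with hjN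
      have hcastj : ((jN:Int)) = (10:Int)^d - 10^(d-1) := by
        rw [hjN]; push_cast [Nat.cast_sub hN1]; ring
      have hjle : jN ≤ fuelA := by omega
      have hsc := scanA max_id d hd jN ((10:Int)^(d-1)) acc fuelA le_rfl
        (by rw [hcastj]; ring) hjle (fun _ => Or.inr hml)
      rw [hsc]
      have hfc : (PySem.List.pyRange ((10:Int)^(d-1)) ((10:Int)^d) 1).filter
            (fun x => decide (x * (10^d + 1) ≤ max_id))
          = PySem.List.pyRange ((10:Int)^(d-1)) (min ((10:Int)^d - 1) T + 1) 1 := by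
        have hc : ∀ x ∈ PySem.List.pyRange ((10:Int)^(d-1)) ((10:Int)^d) 1,
            (decide (x * (10^d + 1) ≤ max_id)) = (decide (x ≤ T)) := by
          intro x hx
          rw [decide_eq_decide]
          exact (PySem.Int.le_floordiv_iff_mul_le hm).symm
        rw [List.filter_congr hc,
          filter_le_pyRange T jN ((10:Int)^(d-1)) ((10:Int)^d) (by omega)]
        congr 1
        omega
      rw [hfc]
      by_cases hstop2 : min ((10:Int)^d - 1) T < (10:Int)^d - 1
      · rw [if_pos hstop2]
        have hThi : T < (10:Int)^d - 1 := by omega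
        have hmaxhi : max_id < ((10:Int)^d - 1) * (10^d + 1) :=
          (PySem.Int.floordiv_lt_iff_lt_mul hm).mp hThi
        obtain ⟨g, hg⟩ : ∃ g, fuelA - jN = g + 1 := ⟨fuelA - jN - 1, by omega⟩
        rw [hg, genLoopA, pyDigitsVal_eq]
        rw [val_block (d+1) ((10:Int)^d) (by omega) (by norm_num) (by nlinarith)]
        rw [if_pos (by nlinarith)]
        have hlen1 : (PySem.Int.toChars ((10:Int)^d)).length = d + 1 :=
          len_block (d+1) _ (by omega) (by norm_num) (by nlinarith)
        have hlen2 : (PySem.Int.toChars ((10:Int)^d - 1)).length = d :=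
          len_block d _ hd (by omega) (by omega)
        rw [if_pos (by omega)]
      · rw [if_neg hstop2]
        have hThi : (10:Int)^d - 1 ≤ T := by omega
        have hmaxhi : ((10:Int)^d - 1) * (10^d + 1) ≤ max_id :=
          (PySem.Int.le_floordiv_iff_mul_le hm).mp hThi
        have hk1 : 1 ≤ k := by
          by_contra h0
          have hk0 : k = 0 := by omega
          subst hk0
          have : max_id < (10:Int)^(2*d) - 1 := by simpa using hmax
          nlinarith
        obtain ⟨k', rfl⟩ : ∃ k', k = k' + 1 := ⟨k-1, by omega⟩
        have hIH := ih k' (by omega) (d+1)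
          (acc ++ (PySem.List.pyRange ((10:Int)^(d-1)) (min ((10:Int)^d - 1) T + 1) 1).map
            (fun x => x * ((10:Int)^d + 1)))
          (fuelA - jN) fB (by omega)
          (by have e : 2*((d+1)+k') = 2*(d+(k'+1)) := by omega
              rw [e]; exact hmax)
          (by have e : (d+1)+k' = d+(k'+1) := by omega
              rw [e]
              have hNc : (10:Nat)^((d+1)-1) = 10^d := by congr 1
              omega)
          (by omega)
        have hdd : (d+1) - 1 = d := by omega
        rw [hdd] at hIH
        rw [hIH]

-- ===== VERDICT (by name: the statement is the Claim_ definition above) =====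
theorem generate_invalid_ids_spec : Claim_equal_generate_invalid_ids := by
  intro max_id hdom
  have h : max_id ≤ 2147483648 := by
    simp [Dom_generate_invalid_ids, pvDomInt] at hdom; exact hdom.2
  unfold Spec_generate_invalid_ids generate_invalid_ids generate_invalid_ids_alt
  have hmb := mainBlocks max_id 5 1 [] 1000000 33 le_rfl
    (by norm_num; omega) (by norm_num) (by norm_num)
  simpa using hmb
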